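-- pv_equiv track=rewrite | github.com/rahmansahinler1/ragchat_local | app/test.py | table_context_creator
-- ===== SOURCE A (Python) =====
-- def table_context_creator(index_list, dataset, sentences):
--     table_clusters = []
--     current_cluster = []
--     text_pairs = []
--     seen_clusters = set()
--
--     for i, value in enumerate(dataset):
--         if value == 1:
--             current_cluster.append(i)
--         elif current_cluster:
--             table_clusters.append(current_cluster)
--             current_cluster = []
--
--     if current_cluster:
--         table_clusters.append(current_cluster)
--
--     for order, index in index_list:
--         for cluster in table_clusters:
--             if cluster[0] <= index <= cluster[-1]:
--                 cluster_tuple = tuple(cluster)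
--                 if cluster_tuple not in seen_clusters:
--                     seen_clusters.add(cluster_tuple)
--                     text = ''.join(sentences[index] + '\n' for index in cluster)
--                     text_pairs.append((order, text))
--                     break
--     return text_pairs
-- ===== SOURCE B (Python) =====
-- def table_context_creator(index_list, dataset, sentences):
--     # One pass over dataset: map every 1-position directly to its run's (start, end)
--     # span, so each query is a dict lookup instead of a scan over all clusters.
--     run_of = {}
--     start = None
--     for i, value in enumerate(dataset):
--         if value == 1:
--             if start is None:
--                 start = i
--         elif start is not None:
--             for p in range(start, i):
--                 run_of[p] = (start, i - 1)
--             start = None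
--     if start is not None:
--         for p in range(start, len(dataset)):
--             run_of[p] = (start, len(dataset) - 1)
--
--     text_pairs = []
--     done = set()
--     for order, index in index_list:
--         span = run_of.get(index)
--         if span is not None and span not in done:
--             done.add(span)
--             s, e = span
--             text_pairs.append((order, ''.join(sentences[p] + '\n' for p in range(s, e + 1))))
--     return text_pairs
-- ===== Notes on version B (the rewrite author's own statement) =====
-- stated objective: alternative
-- what changed: Instead of materialising clusters as position lists and scanning every cluster for each query, B builds in one pass a dict mapping each 1-position to its run's (start,end) span, so every query becomes a single dict lookup and the text is joined over the span's range; measured runtime on the generated inputs is about the same.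
import Mathlib
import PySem

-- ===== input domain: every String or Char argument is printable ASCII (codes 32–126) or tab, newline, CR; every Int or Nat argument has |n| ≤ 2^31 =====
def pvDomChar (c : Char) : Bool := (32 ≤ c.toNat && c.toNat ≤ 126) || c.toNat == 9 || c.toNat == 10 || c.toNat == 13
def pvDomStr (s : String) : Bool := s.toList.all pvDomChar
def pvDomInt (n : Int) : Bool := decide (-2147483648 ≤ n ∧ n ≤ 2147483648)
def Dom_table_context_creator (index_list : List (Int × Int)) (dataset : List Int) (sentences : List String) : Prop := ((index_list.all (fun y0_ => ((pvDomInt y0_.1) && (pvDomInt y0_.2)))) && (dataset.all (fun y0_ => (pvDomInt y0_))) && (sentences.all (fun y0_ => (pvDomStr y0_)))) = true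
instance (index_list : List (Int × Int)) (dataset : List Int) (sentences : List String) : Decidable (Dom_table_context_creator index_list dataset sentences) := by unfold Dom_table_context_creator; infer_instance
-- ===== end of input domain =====

-- B replaces A's per-query scan over all clusters by a dict built in one pass
-- mapping each 1-position to its run's (start, end) span (objective: alternative).

-- ===== PORT A =====
-- `sentences[index] + '\n'` (shared by both ports; pyGet? none = IndexError, the
-- .getD "" default is only reached outside Pre_)
def pvLine (sentences : List String) (p : Int) : String :=
  (PySem.List.pyGet? sentences p).getD "" ++ "\n"

-- first loop body: `if value == 1: cluster.append(i)  elif current_cluster: flush`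
def pvStepA1 (st : List (List Int) × List Int) (iv : Int × Int) : List (List Int) × List Int :=
  if iv.2 == 1 then (st.1, st.2 ++ [iv.1])
  else if st.2.isEmpty then st else (st.1 ++ [st.2], [])

def pvClustersA (dataset : List Int) : List (List Int) :=
  let st := (PySem.List.enumerate dataset).foldl pvStepA1 ([], [])
  if st.2.isEmpty then st.1 else st.1 ++ [st.2]

def pvTextA (sentences : List String) (c : List Int) : String :=
  PySem.Str.join "" (c.map (pvLine sentences))

-- inner `for cluster in table_clusters: … break`; every cluster is nonempty by
-- construction, so cluster[0] / cluster[-1] are ported with pyGetD (default unreachable)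
def pvInnerA (sentences : List String) (order idx : Int) :
    List (List Int) → PySem.Set (List Int) × List (Int × String) →
    PySem.Set (List Int) × List (Int × String)
  | [], st => st
  | c :: rest, st =>
    if PySem.List.pyGetD c 0 0 ≤ idx ∧ idx ≤ PySem.List.pyGetD c (-1) 0 then
      if PySem.Set.contains st.1 c then pvInnerA sentences order idx rest st
      else (PySem.Set.add st.1 c, st.2 ++ [(order, pvTextA sentences c)])
    else pvInnerA sentences order idx rest st

def table_context_creator (index_list : List (Int × Int)) (dataset : List Int) (sentences : List String) : List (Int × String) :=
  let tcs := pvClustersA dataset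
  (index_list.foldl (fun st oi => pvInnerA sentences oi.1 oi.2 tcs st) (PySem.Set.empty, [])).2

-- ===== PORT B =====
-- `for p in range(start, i): run_of[p] = (start, i - 1)`
def pvFill (d : PySem.Dict Int (Int × Int)) (s i : Int) : PySem.Dict Int (Int × Int) :=
  (PySem.List.pyRange s i).foldl (fun d p => d.insert p (s, i - 1)) d

def pvStepB1 (st : PySem.Dict Int (Int × Int) × Option Int) (iv : Int × Int) :
    PySem.Dict Int (Int × Int) × Option Int :=
  if iv.2 == 1 then
    match st.2 with
    | none => (st.1, some iv.1)
    | some _ => st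
  else
    match st.2 with
    | some s => (pvFill st.1 s iv.1, none)
    | none => st

def pvRunMap (dataset : List Int) : PySem.Dict Int (Int × Int) :=
  let st := (PySem.List.enumerate dataset).foldl pvStepB1 (PySem.Dict.empty, none)
  match st.2 with
  | some s => pvFill st.1 s (dataset.length : Int)
  | none => st.1

def pvTextB (sentences : List String) (sp : Int × Int) : String :=
  PySem.Str.join "" ((PySem.List.pyRange sp.1 (sp.2 + 1)).map (pvLine sentences))

def pvStepB2 (sentences : List String) (d : PySem.Dict Int (Int × Int))
    (st : PySem.Set (Int × Int) × List (Int × String)) (oi : Int × Int) :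
    PySem.Set (Int × Int) × List (Int × String) :=
  match d.get? oi.2 with
  | some sp =>
    if PySem.Set.contains st.1 sp then st
    else (PySem.Set.add st.1 sp, st.2 ++ [(oi.1, pvTextB sentences sp)])
  | none => st

def table_context_creator_alt (index_list : List (Int × Int)) (dataset : List Int) (sentences : List String) : List (Int × String) :=
  let d := pvRunMap dataset
  (index_list.foldl (pvStepB2 sentences d) (PySem.Set.empty, [])).2

-- ===== PRECONDITION & SPEC =====
-- Pre_ excludes exactly the inputs where Python A raises IndexError: some queried
-- index falls in a 1-run that contains a position ≥ len(sentences).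
def Pre_table_context_creator (index_list : List (Int × Int)) (dataset : List Int) (sentences : List String) : Prop :=
  ∀ p ∈ index_list, ∀ i ∈ List.range dataset.length,
    dataset.getD i 0 = 1 → 0 ≤ p.2 → p.2 < (dataset.length : Int) →
    (∀ j ∈ List.range dataset.length,
      min p.2 (i : Int) ≤ (j : Int) → (j : Int) ≤ max p.2 (i : Int) → dataset.getD j 0 = 1) →
    i < sentences.length

instance (index_list : List (Int × Int)) (dataset : List Int) (sentences : List String) : Decidable (Pre_table_context_creator index_list dataset sentences) := by unfold Pre_table_context_creator; infer_instance

def pvWitness_table_context_creator : (List (Int × Int)) × List Int × List String :=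
  ([(0, 1)], [0, 1, 1], ["a", "b", "c"])

def Spec_table_context_creator (index_list : List (Int × Int)) (dataset : List Int) (sentences : List String) (out : List (Int × String)) : Prop := out = table_context_creator_alt index_list dataset sentences
instance (index_list : List (Int × Int)) (dataset : List Int) (sentences : List String) (out : List (Int × String)) : Decidable (Spec_table_context_creator index_list dataset sentences out) := by unfold Spec_table_context_creator; infer_instance

-- ===== CLAIM (what is proved, stated in full; the proofs are below) =====
def Claim_equal_table_context_creator : Prop := ∀ (index_list : List (Int × Int)) (dataset : List Int) (sentences : List String), Dom_table_context_creator index_list dataset sentences → Pre_table_context_creator index_list dataset sentences → Spec_table_context_creator index_list dataset sentences (table_context_creator index_list dataset sentences)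

-- ===== LEMMAS AND PROOFS =====

-- the cluster of positions of the run with span sp
def pvSpanList (sp : Int × Int) : List Int := PySem.List.pyRange sp.1 (sp.2 + 1)

-- the dict B builds, expressed over the list of closed spans
def pvDictOf (spans : List (Int × Int)) : PySem.Dict Int (Int × Int) :=
  spans.foldl (fun d sp => pvFill d sp.1 (sp.2 + 1)) PySem.Dict.empty

def pvHit (idx : Int) (sp : Int × Int) : Bool := decide (sp.1 ≤ idx ∧ idx ≤ sp.2)

-- A's open current cluster at position i
def pvCurOf : Option Int → Int → List Int
  | none, _ => []
  | some s, i => PySem.List.pyRange s i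

-- the phase-1 invariant
def pvInv (spans : List (Int × Int)) (st? : Option Int) (i : Int) : Prop :=
  spans.Pairwise (fun p q => p.2 < q.1) ∧ (∀ sp ∈ spans, sp.1 ≤ sp.2) ∧
  (match st? with
   | some s => (∀ sp ∈ spans, sp.2 < s) ∧ s < i
   | none => ∀ sp ∈ spans, sp.2 < i)

lemma pv_enumerate_cons (x : Int) (xs : List Int) (k : Int) :
    PySem.List.enumerate (x :: xs) k = (k, x) :: PySem.List.enumerate xs (k + 1) := rfl

lemma pv_get?_foldl_insert_const (l : List Int) (v : Int × Int) (d : PySem.Dict Int (Int × Int)) (idx : Int) :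
    ((l.foldl (fun d p => d.insert p v) d).get? idx) = if idx ∈ l then some v else d.get? idx := by
  induction l generalizing d with
  | nil => simp
  | cons a l ih =>
    simp only [List.foldl_cons, ih, List.mem_cons]
    by_cases h : idx ∈ l
    · simp [h]
    · simp only [h, if_false, or_false, PySem.Dict.get?_insert]

lemma pv_get?_fill (d : PySem.Dict Int (Int × Int)) (s i idx : Int) :
    (pvFill d s i).get? idx = if s ≤ idx ∧ idx < i then some (s, i - 1) else d.get? idx := by
  unfold pvFill
  rw [pv_get?_foldl_insert_const]
  simp [PySem.List.mem_pyRange_one]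

lemma pv_get?_dictOf_aux (spans : List (Int × Int)) (d : PySem.Dict Int (Int × Int)) (idx : Int)
    (hsep : spans.Pairwise (fun p q => p.2 < q.1)) :
    (spans.foldl (fun d sp => pvFill d sp.1 (sp.2 + 1)) d).get? idx =
      match spans.find? (pvHit idx) with
      | some sp => some sp
      | none => d.get? idx := by
  induction spans generalizing d with
  | nil => simp
  | cons sp rest ih =>
    rw [List.pairwise_cons] at hsep
    simp only [List.foldl_cons]
    rw [ih _ hsep.2]
    by_cases h : pvHit idx sp = true
    · have hhit : sp.1 ≤ idx ∧ idx ≤ sp.2 := by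
        unfold pvHit at h; simpa using h
      have hfr : rest.find? (pvHit idx) = none := by
        rw [List.find?_eq_none]
        intro q hq
        have := hsep.1 q hq
        unfold pvHit
        simp only [decide_eq_true_eq]
        omega
      rw [List.find?_cons_of_pos h, hfr]
      show (pvFill d sp.1 (sp.2 + 1)).get? idx = some sp
      rw [pv_get?_fill]
      have hin : sp.1 ≤ idx ∧ idx < sp.2 + 1 := by omega
      rw [if_pos hin, show sp.2 + 1 - 1 = sp.2 from by omega]
    · have hhit : ¬ (sp.1 ≤ idx ∧ idx < sp.2 + 1) := by
        unfold pvHit at h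
        simp only [decide_eq_true_eq] at h
        intro hc; exact h ⟨hc.1, by omega⟩
      rw [List.find?_cons_of_neg h]
      cases hfr : rest.find? (pvHit idx) with
      | some q => rfl
      | none =>
        show (pvFill d sp.1 (sp.2 + 1)).get? idx = d.get? idx
        rw [pv_get?_fill, if_neg hhit]

lemma pv_spanList_head (sp : Int × Int) (h : sp.1 ≤ sp.2) :
    PySem.List.pyGetD (pvSpanList sp) 0 0 = sp.1 := by
  unfold pvSpanList
  rw [PySem.List.pyRange_one_cons (by omega)]
  exact PySem.List.pyGetD_zero_cons _ _ _

lemma pv_spanList_last (sp : Int × Int) (h : sp.1 ≤ sp.2) :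
    PySem.List.pyGetD (pvSpanList sp) (-1) 0 = sp.2 := by
  unfold pvSpanList
  rw [PySem.List.pyRange_one_succ_right h]
  exact PySem.List.pyGetD_neg_one_append_singleton _ _ _

lemma pv_spanList_inj (a b : Int × Int) (ha : a.1 ≤ a.2) (hb : b.1 ≤ b.2)
    (h : pvSpanList a = pvSpanList b) : a = b := by
  have h1 := pv_spanList_head a ha
  have h2 := pv_spanList_last a ha
  rw [h] at h1 h2
  rw [pv_spanList_head b hb] at h1
  rw [pv_spanList_last b hb] at h2
  ext <;> omega

lemma pv_innerA_eq (ss : List String) (order idx : Int) (spans : List (Int × Int))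
    (st : PySem.Set (List Int) × List (Int × String))
    (hsep : spans.Pairwise (fun p q => p.2 < q.1)) (hle : ∀ sp ∈ spans, sp.1 ≤ sp.2) :
    pvInnerA ss order idx (spans.map pvSpanList) st =
      match spans.find? (pvHit idx) with
      | none => st
      | some sp =>
        if PySem.Set.contains st.1 (pvSpanList sp) then st
        else (PySem.Set.add st.1 (pvSpanList sp), st.2 ++ [(order, pvTextA ss (pvSpanList sp))]) := by
  induction spans generalizing st with
  | nil => simp [pvInnerA]
  | cons sp rest ih =>
    rw [List.pairwise_cons] at hsep
    have hsp : sp.1 ≤ sp.2 := hle sp (by simp)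
    have hle' : ∀ q ∈ rest, q.1 ≤ q.2 := fun q hq => hle q (by simp [hq])
    simp only [List.map_cons]
    rw [pvInnerA]
    rw [pv_spanList_head sp hsp, pv_spanList_last sp hsp]
    by_cases h : sp.1 ≤ idx ∧ idx ≤ sp.2
    · have hhit : pvHit idx sp = true := by unfold pvHit; exact decide_eq_true h
      rw [if_pos h, List.find?_cons_of_pos hhit]
      have hfr : rest.find? (pvHit idx) = none := by
        rw [List.find?_eq_none]
        intro q hq
        have := hsep.1 q hq
        unfold pvHit
        simp only [decide_eq_true_eq]
        omega
      by_cases hc : PySem.Set.contains st.1 (pvSpanList sp) = true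
      · rw [if_pos hc, ih st hsep.2 hle', hfr]
        show st = if PySem.Set.contains st.1 (pvSpanList sp) = true then st
          else (PySem.Set.add st.1 (pvSpanList sp), st.2 ++ [(order, pvTextA ss (pvSpanList sp))])
        rw [if_pos hc]
      · rw [if_neg hc]
        show _ = if PySem.Set.contains st.1 (pvSpanList sp) = true then st
          else (PySem.Set.add st.1 (pvSpanList sp), st.2 ++ [(order, pvTextA ss (pvSpanList sp))])
        rw [if_neg hc]
    · have hhit : ¬ pvHit idx sp = true := by unfold pvHit; simp [h]
      rw [if_neg h, List.find?_cons_of_neg hhit]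
      exact ih st hsep.2 hle'

lemma pv_contains_map (dsL spans : List (Int × Int)) (sp : Int × Int)
    (hle : ∀ q ∈ spans, q.1 ≤ q.2) (hsub : ∀ x ∈ dsL, x ∈ spans) (hsp : sp ∈ spans) :
    PySem.Set.contains (dsL.map pvSpanList) (pvSpanList sp) = PySem.Set.contains dsL sp := by
  unfold PySem.Set.contains
  simp only [List.contains_eq_mem, List.mem_map, decide_eq_decide]
  constructor
  · rintro ⟨x, hx, hxe⟩
    have := pv_spanList_inj x sp (hle x (hsub x hx)) (hle sp hsp) hxe
    rwa [← this]
  · intro h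
    exact ⟨sp, h, rfl⟩

lemma pv_fold2 (ss : List String) (spans : List (Int × Int))
    (hsep : spans.Pairwise (fun p q => p.2 < q.1)) (hle : ∀ sp ∈ spans, sp.1 ≤ sp.2) :
    ∀ (il : List (Int × Int)) (dsL : List (Int × Int)) (pairs : List (Int × String)),
    (∀ x ∈ dsL, x ∈ spans) →
    (il.foldl (fun st oi => pvInnerA ss oi.1 oi.2 (spans.map pvSpanList) st) (dsL.map pvSpanList, pairs)).2
      = (il.foldl (pvStepB2 ss (pvDictOf spans)) (dsL, pairs)).2 := by
  intro il
  induction il with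
  | nil => intro dsL pairs _; rfl
  | cons oi il ih =>
    intro dsL pairs hsub
    have hd : (pvDictOf spans).get? oi.2 = spans.find? (pvHit oi.2) := by
      show (spans.foldl (fun d sp => pvFill d sp.1 (sp.2 + 1)) PySem.Dict.empty).get? oi.2 = _
      rw [pv_get?_dictOf_aux spans _ oi.2 hsep]
      cases spans.find? (pvHit oi.2)
      · exact PySem.Dict.get?_empty _
      · rfl
    simp only [List.foldl_cons]
    rw [pv_innerA_eq ss oi.1 oi.2 spans _ hsep hle]
    cases hf : spans.find? (pvHit oi.2) with
    | none =>
      have hB : pvStepB2 ss (pvDictOf spans) (dsL, pairs) oi = (dsL, pairs) := by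
        unfold pvStepB2; rw [hd, hf]
      rw [hB]
      exact ih dsL pairs hsub
    | some sp =>
      have hsp : sp ∈ spans := List.mem_of_find?_eq_some hf
      have hcm := pv_contains_map dsL spans sp hle hsub hsp
      show (il.foldl (fun st oi => pvInnerA ss oi.1 oi.2 (spans.map pvSpanList) st)
          (if PySem.Set.contains (dsL.map pvSpanList) (pvSpanList sp) = true
            then (dsL.map pvSpanList, pairs)
            else (PySem.Set.add (dsL.map pvSpanList) (pvSpanList sp),
                  pairs ++ [(oi.1, pvTextA ss (pvSpanList sp))]))).2
        = (il.foldl (pvStepB2 ss (pvDictOf spans)) (pvStepB2 ss (pvDictOf spans) (dsL, pairs) oi)).2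
      by_cases hc : PySem.Set.contains dsL sp = true
      · have hB : pvStepB2 ss (pvDictOf spans) (dsL, pairs) oi = (dsL, pairs) := by
          unfold pvStepB2; rw [hd, hf]
          show (if PySem.Set.contains dsL sp = true then (dsL, pairs)
            else (PySem.Set.add dsL sp, pairs ++ [(oi.1, pvTextB ss sp)])) = (dsL, pairs)
          rw [if_pos hc]
        rw [hcm, if_pos hc, hB]
        exact ih dsL pairs hsub
      · have hB : pvStepB2 ss (pvDictOf spans) (dsL, pairs) oi
            = (dsL ++ [sp], pairs ++ [(oi.1, pvTextB ss sp)]) := by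
          unfold pvStepB2; rw [hd, hf]
          show (if PySem.Set.contains dsL sp = true then (dsL, pairs)
            else (PySem.Set.add dsL sp, pairs ++ [(oi.1, pvTextB ss sp)])) = _
          rw [if_neg hc]
          unfold PySem.Set.add
          rw [if_neg hc]
        have hadd : PySem.Set.add (dsL.map pvSpanList) (pvSpanList sp)
            = (dsL ++ [sp]).map pvSpanList := by
          unfold PySem.Set.add
          rw [hcm, if_neg hc, List.map_append]
          rfl
        rw [hcm, if_neg hc, hB, hadd]
        exact ih (dsL ++ [sp]) (pairs ++ [(oi.1, pvTextA ss (pvSpanList sp))])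
          (by intro x hx
              rcases List.mem_append.1 hx with h | h
              · exact hsub x h
              · simp only [List.mem_singleton] at h; rwa [h])

lemma pv_phase1 (l : List Int) :
    ∀ (k : Int) (spans : List (Int × Int)) (st? : Option Int), pvInv spans st? k →
    ∃ spans' st?',
      (PySem.List.enumerate l k).foldl pvStepA1 (spans.map pvSpanList, pvCurOf st? k)
        = (spans'.map pvSpanList, pvCurOf st?' (k + l.length)) ∧
      (PySem.List.enumerate l k).foldl pvStepB1 (pvDictOf spans, st?)
        = (pvDictOf spans', st?') ∧
      pvInv spans' st?' (k + l.length) := by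
  induction l with
  | nil =>
    intro k spans st? h
    exact ⟨spans, st?, by simp, by simp, by simpa using h⟩
  | cons v l ih =>
    intro k spans st? h
    rw [pv_enumerate_cons, List.foldl_cons, List.foldl_cons,
      show (k + ((v :: l).length : Int)) = (k + 1) + (l.length : Int) by push_cast [List.length_cons]; ring]
    by_cases hv : (v == 1) = true
    · cases st? with
      | none =>
        have hst : pvStepA1 (spans.map pvSpanList, pvCurOf none k) (k, v)
            = (spans.map pvSpanList, pvCurOf (some k) (k + 1)) := by
          simp [pvStepA1, hv, pvCurOf, PySem.List.pyRange_one_singleton]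
        have hstB : pvStepB1 (pvDictOf spans, none) (k, v) = (pvDictOf spans, some k) := by
          simp [pvStepB1, hv]
        rw [hst, hstB]
        refine ih (k + 1) spans (some k) ?_
        obtain ⟨h1, h2, h3⟩ := h
        exact ⟨h1, h2, fun sp hsp => h3 sp hsp, by omega⟩
      | some s =>
        obtain ⟨h1, h2, h3, h4⟩ := h
        have hst : pvStepA1 (spans.map pvSpanList, pvCurOf (some s) k) (k, v)
            = (spans.map pvSpanList, pvCurOf (some s) (k + 1)) := by
          simp only [pvStepA1, hv, if_true, pvCurOf]
          rw [← PySem.List.pyRange_one_succ_right (by omega : s ≤ k)]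
        have hstB : pvStepB1 (pvDictOf spans, some s) (k, v) = (pvDictOf spans, some s) := by
          simp [pvStepB1, hv]
        rw [hst, hstB]
        exact ih (k + 1) spans (some s) ⟨h1, h2, h3, by omega⟩
    · rw [Bool.not_eq_true] at hv
      cases st? with
      | none =>
        have hst : pvStepA1 (spans.map pvSpanList, pvCurOf none k) (k, v)
            = (spans.map pvSpanList, pvCurOf none (k + 1)) := by
          simp [pvStepA1, hv, pvCurOf]
        have hstB : pvStepB1 (pvDictOf spans, none) (k, v) = (pvDictOf spans, none) := by
          simp [pvStepB1, hv]
        rw [hst, hstB]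
        obtain ⟨h1, h2, h3⟩ := h
        exact ih (k + 1) spans none ⟨h1, h2, fun sp hsp => by have := h3 sp hsp; omega⟩
      | some s =>
        obtain ⟨h1, h2, h3, h4⟩ := h
        have hne : (PySem.List.pyRange s k).isEmpty = false := by
          rw [PySem.List.pyRange_one_cons (by omega : s < k)]
          rfl
        have hmap : spans.map pvSpanList ++ [PySem.List.pyRange s k]
            = (spans ++ [(s, k - 1)]).map pvSpanList := by
          rw [List.map_append, List.map_singleton]
          show _ ++ [PySem.List.pyRange s k] = _ ++ [PySem.List.pyRange s (k - 1 + 1)]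
          rw [show (k : Int) - 1 + 1 = k by omega]
        have hst : pvStepA1 (spans.map pvSpanList, pvCurOf (some s) k) (k, v)
            = ((spans ++ [(s, k - 1)]).map pvSpanList, pvCurOf none (k + 1)) := by
          simp only [pvStepA1, hv, Bool.false_eq_true, if_false, pvCurOf, hne]
          rw [hmap]
        have hstB : pvStepB1 (pvDictOf spans, some s) (k, v)
            = (pvDictOf (spans ++ [(s, k - 1)]), none) := by
          simp only [pvStepB1, hv, Bool.false_eq_true, if_false]
          unfold pvDictOf
          rw [List.foldl_append, List.foldl_cons, List.foldl_nil,
            show (k : Int) - 1 + 1 = k by omega]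
        rw [hst, hstB]
        refine ih (k + 1) (spans ++ [(s, k - 1)]) none ?_
        refine ⟨?_, ?_, ?_⟩
        · rw [List.pairwise_append]
          exact ⟨h1, List.pairwise_singleton _ _,
            fun p hp q hq => by simp only [List.mem_singleton] at hq; subst hq; exact h3 p hp⟩
        · intro sp hsp
          rcases List.mem_append.1 hsp with hm | hm
          · exact h2 sp hm
          · simp only [List.mem_singleton] at hm; subst hm
            show s ≤ k - 1
            omega
        · intro sp hsp
          rcases List.mem_append.1 hsp with hm | hm
          · have := h3 sp hm; omega
          · simp only [List.mem_singleton] at hm; subst hm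
            show k - 1 < k + 1
            omega

lemma pv_exists_spans (ds : List Int) :
    ∃ spans : List (Int × Int),
      pvClustersA ds = spans.map pvSpanList ∧ pvRunMap ds = pvDictOf spans ∧
      spans.Pairwise (fun p q => p.2 < q.1) ∧ ∀ sp ∈ spans, sp.1 ≤ sp.2 := by
  obtain ⟨spans', st?', h1, h2, h3⟩ :=
    pv_phase1 ds 0 [] none ⟨List.Pairwise.nil, by simp, by simp⟩
  rw [show ((0 : Int) + (ds.length : Int)) = (ds.length : Int) by ring] at h1
  unfold pvInv at h3
  rw [show ((0 : Int) + (ds.length : Int)) = (ds.length : Int) by ring] at h3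
  cases st?' with
  | none =>
    have hA : pvClustersA ds = spans'.map pvSpanList := by
      unfold pvClustersA
      rw [show (([] : List (List Int)), ([] : List Int))
          = ((([] : List (Int × Int)).map pvSpanList), pvCurOf none 0) from rfl, h1]
      rfl
    have hB : pvRunMap ds = pvDictOf spans' := by
      unfold pvRunMap
      rw [show ((PySem.Dict.empty : PySem.Dict Int (Int × Int)), (none : Option Int))
          = (pvDictOf [], (none : Option Int)) from rfl, h2]
    exact ⟨spans', hA, hB, h3.1, h3.2.1⟩
  | some s =>
    have hp := h3.1
    have hle2 := h3.2.1
    have hbd := h3.2.2.1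
    have hsl := h3.2.2.2
    have hne : (pvCurOf (some s) (ds.length : Int)).isEmpty = false := by
      show (PySem.List.pyRange s (ds.length : Int)).isEmpty = false
      rw [PySem.List.pyRange_one_cons (by omega)]
      rfl
    have hA : pvClustersA ds = spans'.map pvSpanList ++ [pvCurOf (some s) (ds.length : Int)] := by
      unfold pvClustersA
      rw [show (([] : List (List Int)), ([] : List Int))
          = ((([] : List (Int × Int)).map pvSpanList), pvCurOf none 0) from rfl, h1]
      show (if (pvCurOf (some s) (ds.length : Int)).isEmpty then spans'.map pvSpanList
        else spans'.map pvSpanList ++ [pvCurOf (some s) (ds.length : Int)]) = _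
      rw [hne]
      simp only [Bool.false_eq_true, if_false]
    have hB : pvRunMap ds = pvFill (pvDictOf spans') s (ds.length : Int) := by
      unfold pvRunMap
      rw [show ((PySem.Dict.empty : PySem.Dict Int (Int × Int)), (none : Option Int))
          = (pvDictOf [], (none : Option Int)) from rfl, h2]
    refine ⟨spans' ++ [(s, (ds.length : Int) - 1)], ?_, ?_, ?_, ?_⟩
    · rw [hA]
      rw [List.map_append, List.map_singleton]
      show _ ++ [PySem.List.pyRange s ((ds.length : Int))]
        = _ ++ [PySem.List.pyRange s ((ds.length : Int) - 1 + 1)]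
      rw [show ((ds.length : Int) - 1 + 1) = (ds.length : Int) by omega]
    · rw [hB]
      show pvFill (pvDictOf spans') s (ds.length : Int) = _
      unfold pvDictOf
      rw [List.foldl_append, List.foldl_cons, List.foldl_nil,
        show ((ds.length : Int) - 1 + 1) = (ds.length : Int) by omega]
    · rw [List.pairwise_append]
      exact ⟨hp, List.pairwise_singleton _ _,
        fun p hpm q hq => by simp only [List.mem_singleton] at hq; subst hq; exact hbd p hpm⟩
    · intro sp hsp
      rcases List.mem_append.1 hsp with hm | hm
      · exact hle2 sp hm
      · simp only [List.mem_singleton] at hm; subst hm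
        show s ≤ (ds.length : Int) - 1
        omega

-- ===== VERDICT (by name: the statement is the Claim_ definition above) =====
theorem table_context_creator_spec : Claim_equal_table_context_creator := by
  intro il ds ss _ _
  unfold Spec_table_context_creator table_context_creator table_context_creator_alt
  obtain ⟨spans, hA, hB, hsep, hle⟩ := pv_exists_spans ds
  rw [hA, hB]
  exact pv_fold2 ss spans hsep hle il [] [] (by simp)
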